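-- pv_equiv track=rewrite | github.com/AlissoftCodes/CPF-validator | cpf_validator.py | cpf_format
-- ===== SOURCE A (Python) =====
-- def cpf_format(cpf):
--
-- 	try:
-- 		cpf = int(''.join(i for i in cpf if i.isnumeric()))
-- 	except ValueError:
-- 		cpf = 0
--
-- 	cpf = f'{cpf:011d}'
-- 	count = 0
-- 	rounds = 0
-- 	new_cpf = ''
--
-- 	for i in cpf:
--
-- 		if len(new_cpf) == 14:
-- 			break
-- 		count += 1
-- 		new_cpf += i
--
-- 		if count == 3:
--
-- 			if rounds < 2:
-- 				rounds += 1
-- 				new_cpf += '.'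
-- 			else:
-- 				new_cpf += '-'
-- 			count = 0
--
-- 	return new_cpf
-- ===== SOURCE B (Python) =====
-- def cpf_format(cpf):
--     try:
--         cpf = int(''.join(i for i in cpf if i.isnumeric()))
--     except ValueError:
--         cpf = 0
--     cpf = f'{cpf:011d}'
--     return f'{cpf[:3]}.{cpf[3:6]}.{cpf[6:9]}-{cpf[9:11]}'
-- ===== Notes on version B (the rewrite author's own statement) =====
-- stated objective: simpler
-- what changed: The counter/rounds loop with a 14-char break is replaced by one f-string that slices the zero-padded digit string at fixed positions (s[:3], s[3:6], s[6:9], s[9:11]); the digit-filter/int/zfill preamble is kept verbatim.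
import Mathlib
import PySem

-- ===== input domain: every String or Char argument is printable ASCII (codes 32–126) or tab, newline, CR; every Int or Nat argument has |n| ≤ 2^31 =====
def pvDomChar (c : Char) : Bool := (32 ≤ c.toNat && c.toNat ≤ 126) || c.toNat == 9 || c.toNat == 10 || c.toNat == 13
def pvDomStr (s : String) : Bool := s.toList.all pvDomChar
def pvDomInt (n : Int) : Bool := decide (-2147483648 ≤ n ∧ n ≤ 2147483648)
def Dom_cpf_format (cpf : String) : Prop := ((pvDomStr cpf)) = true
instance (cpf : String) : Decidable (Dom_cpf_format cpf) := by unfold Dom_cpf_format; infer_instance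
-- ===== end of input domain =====

-- B replaces A's counter/rounds loop with direct fixed-position slicing of the
-- 11-zero-padded digit string (objective: simpler).

-- ===== PORT A =====
-- Shared preamble of both Pythons: filter the numeric characters, int('' ) on
-- failure is 0, then f'{n:011d}'.  On the printable-ASCII domain i.isnumeric()
-- coincides with PySem.Chars.isdigit; the 011d format of the (here nonnegative)
-- int is PySem.Chars.zfill (toChars n) 11.
def pvDigitsPadded (cpf : String) : List Char :=
  let n := (PySem.Int.ofChars? (cpf.toList.filter PySem.Chars.isdigit)).getD 0
  PySem.Chars.zfill (PySem.Int.toChars n) 11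

-- A's for-loop with count/rounds state and the len==14 break, step for step.
def cpfLoopA : List Char → Nat → Nat → List Char → List Char
  | [], _, _, new_cpf => new_cpf
  | c :: rest, count, rounds, new_cpf =>
    if new_cpf.length == 14 then new_cpf
    else
      let count := count + 1
      let new_cpf := new_cpf ++ [c]
      if count == 3 then
        if rounds < 2 then cpfLoopA rest 0 (rounds + 1) (new_cpf ++ ['.'])
        else cpfLoopA rest 0 rounds (new_cpf ++ ['-'])
      else cpfLoopA rest count rounds new_cpf

def cpf_format (cpf : String) : String :=
  String.ofList (cpfLoopA (pvDigitsPadded cpf) 0 0 [])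

-- ===== PORT B =====
-- f'{s[:3]}.{s[3:6]}.{s[6:9]}-{s[9:11]}'
def cpf_format_alt (cpf : String) : String :=
  let s := pvDigitsPadded cpf
  String.ofList (PySem.List.slice s none (some 3) ++ ['.'] ++
   PySem.List.slice s (some 3) (some 6) ++ ['.'] ++
   PySem.List.slice s (some 6) (some 9) ++ ['-'] ++
   PySem.List.slice s (some 9) (some 11))

-- ===== PRECONDITION & SPEC =====
def Spec_cpf_format (cpf : String) (out : String) : Prop := out = cpf_format_alt cpf
instance (cpf : String) (out : String) : Decidable (Spec_cpf_format cpf out) := by unfold Spec_cpf_format; infer_instance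

-- ===== CLAIM (what is proved, stated in full; the proofs are below) =====
def Claim_equal_cpf_format : Prop := ∀ (cpf : String), Dom_cpf_format cpf → Spec_cpf_format cpf (cpf_format cpf)

-- ===== LEMMAS AND PROOFS =====

-- The padded digit string always has at least 11 characters.
theorem pvDigitsPadded_len (cpf : String) : 11 ≤ (pvDigitsPadded cpf).length := by
  simp [pvDigitsPadded, PySem.Chars.length_zfill]

-- On any list of ≥ 11 characters, A's loop produces the four masked groups.
theorem cpfLoopA_mask (a b c d e f g h i j k : Char) (rest : List Char) :
    cpfLoopA (a::b::c::d::e::f::g::h::i::j::k::rest) 0 0 [] =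
      [a, b, c, '.', d, e, f, '.', g, h, i, '-', j, k] := by
  cases rest <;> rfl

-- A list of at least 11 elements decomposes into 11 heads and a tail.
theorem pvList_cons11 {alpha : Type} (xs : List alpha) (h : 11 ≤ xs.length) :
    ∃ a b c d e f g i j k l rest, xs = a::b::c::d::e::f::g::i::j::k::l::rest := by
  rcases xs with _|⟨a,xs⟩; · simp at h
  rcases xs with _|⟨b,xs⟩; · simp at h
  rcases xs with _|⟨c,xs⟩; · simp at h
  rcases xs with _|⟨d,xs⟩; · simp at h
  rcases xs with _|⟨e,xs⟩; · simp at h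
  rcases xs with _|⟨f,xs⟩; · simp at h
  rcases xs with _|⟨g,xs⟩; · simp at h
  rcases xs with _|⟨i,xs⟩; · simp at h
  rcases xs with _|⟨j,xs⟩; · simp at h
  rcases xs with _|⟨k,xs⟩; · simp at h
  rcases xs with _|⟨l,xs⟩; · simp at h
  exact ⟨a,b,c,d,e,f,g,i,j,k,l,xs,rfl⟩

theorem cpf_format_spec : Claim_equal_cpf_format := by
  intro cpf _
  unfold Spec_cpf_format cpf_format cpf_format_alt
  obtain ⟨a, b, c, d, e, f, g, i, j, k, l, rest, hs⟩ :=
    pvList_cons11 (pvDigitsPadded cpf) (pvDigitsPadded_len cpf)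
  rw [hs, cpfLoopA_mask]
  rfl
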